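-- pv_equiv track=rewrite | github.com/RahulARanger/My_Python_Book | Basics/Arrays/grp_flips.py | find
-- ===== SOURCE A (Python) =====
-- def find(test):
--     is_1 = test[0] == test[-1] == 0
--     # if last and first element are same then that digit there's highest (0 or 1 here)'s group  or maybe there's only one digit
--     # else then both are of same count
--     target = []
--     over = True
--     length = len(test)
--
--     for _ in range(length):
--         if (test[_] == 1 and is_1) or (test[_] == 0 and not is_1):
--
--             if not over:
--                 continue
--
--             target.append([_])
--             over = False
--
--         else:
--             if over:
--                 continue
--
--             target[-1].append(_ - 1)
--             over = True
--
--     if not over: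
--         target[-1].append(length - 1)
--
--     return target
-- ===== SOURCE B (Python) =====
-- def find(test):
--     target_val = 1 if test[0] == test[-1] == 0 else 0
--     res = []
--     i, n = 0, len(test)
--     while i < n:
--         v = test[i]
--         j = i
--         while j < n and test[j] == v:
--             j += 1
--         if v == target_val:
--             res.append([i, j - 1])
--         i = j
--     return res
-- ===== Notes on version B (the rewrite author's own statement) =====
-- stated objective: alternative
-- what changed: Replaces A's index-by-index state machine with an over flag and in-place target[-1].append closing by a run-based two-pointer scan that measures each maximal run of equal values and emits [start, end] directly for runs of the minority value.
import Mathlib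
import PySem

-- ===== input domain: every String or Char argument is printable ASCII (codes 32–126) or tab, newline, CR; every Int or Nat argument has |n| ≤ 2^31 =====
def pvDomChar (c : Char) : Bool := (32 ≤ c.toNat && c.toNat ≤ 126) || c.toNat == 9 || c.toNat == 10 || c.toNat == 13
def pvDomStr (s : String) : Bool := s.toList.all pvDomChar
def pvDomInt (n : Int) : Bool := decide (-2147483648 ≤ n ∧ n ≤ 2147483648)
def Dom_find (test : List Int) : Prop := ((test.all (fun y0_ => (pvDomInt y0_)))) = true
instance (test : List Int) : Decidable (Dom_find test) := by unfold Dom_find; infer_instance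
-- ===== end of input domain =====

-- B replaces A's over-flag state machine with a run-based two-pointer scan (objective: alternative/idiomatic).

-- ===== PORT A =====
-- test[_] for an index known to be in range (exact there)
def pvAtA (test : List Int) (i : Nat) : Int := test.getD i 0
-- target[-1].append(x)
def pvAppendLast : List (List Int) → Int → List (List Int)
  | [], _ => []
  | [l], x => [l ++ [x]]
  | l :: ls, x => l :: pvAppendLast ls x

-- the 'for _ in range(length)' loop with state (target, ov=over), followed by the closing 'if not over' step
def findLoop (test : List Int) (is1 : Bool) (i : Nat) (target : List (List Int)) (ov : Bool) :
    List (List Int) :=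
  if _h : i < test.length then
    if ((pvAtA test i == 1 && is1) || (pvAtA test i == 0 && !is1)) then
      if ov = false then findLoop test is1 (i+1) target ov
      else findLoop test is1 (i+1) (target ++ [[(i : Int)]]) false
    else
      if ov = true then findLoop test is1 (i+1) target ov
      else findLoop test is1 (i+1) (pvAppendLast target ((i : Int) - 1)) true
  else
    if ov = false then pvAppendLast target ((test.length : Int) - 1) else target
termination_by test.length - i

def find (test : List Int) : List (List Int) :=
  match PySem.List.pyGet? test 0, PySem.List.pyGet? test (-1) with
  | some a, some b =>
    findLoop test (a == b && b == 0) 0 [] true   -- is_1 = (test[0] == test[-1] == 0)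
  | _, _ => []   -- IndexError on empty input: excluded by Pre_find

-- ===== PORT B =====
-- test[j] for an index known to be in range (exact there)
def pvAt (test : List Int) (i : Nat) : Int := test.getD i 0

-- inner while: first index j ≥ start with test[j] ≠ v (or len)
def runEnd (test : List Int) (v : Int) (j : Nat) : Nat :=
  if _h : j < test.length ∧ pvAt test j = v then runEnd test v (j+1) else j
termination_by test.length - j
decreasing_by omega

theorem le_runEnd (test : List Int) (v : Int) (j : Nat) : j ≤ runEnd test v j := by
  fun_induction runEnd with
  | case1 j h ih => omega
  | case2 j h => omega

-- outer while: scan run by run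
def runsB (test : List Int) (tv : Int) (i : Nat) : List (List Int) :=
  if _h : i < test.length then
    let j := runEnd test (pvAt test i) i
    (if pvAt test i = tv then [[(i : Int), (j : Int) - 1]] else []) ++ runsB test tv j
  else []
termination_by test.length - i
decreasing_by
  have h1 : runEnd test (pvAt test i) i = runEnd test (pvAt test i) (i+1) := by
    rw [runEnd]; simp [_h]
  have h2 := le_runEnd test (pvAt test i) (i+1)
  omega

def find_alt (test : List Int) : List (List Int) :=
  match PySem.List.pyGet? test 0 with
  | none => []   -- IndexError on empty input: excluded by Pre_find
  | some a =>
    match PySem.List.pyGet? test (-1) with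
    | none => []
    | some b => runsB test (if a == b && b == 0 then 1 else 0) 0   -- target_val

-- ===== PRECONDITION & SPEC =====
-- A raises IndexError on the empty list (test[0]); B raises there too.
def Pre_find (test : List Int) : Prop := test ≠ []
instance (test : List Int) : Decidable (Pre_find test) := by unfold Pre_find; infer_instance
def pvWitness_find : List Int := [0, 1, 1, 0]

def Spec_find (test : List Int) (out : List (List Int)) : Prop := out = find_alt test
instance (test : List Int) (out : List (List Int)) : Decidable (Spec_find test out) := by unfold Spec_find; infer_instance

-- ===== CLAIM (what is proved, stated in full; the proofs are below) =====
def Claim_equal_find : Prop := ∀ (test : List Int), Dom_find test → Pre_find test → Spec_find test (find test)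

-- ===== LEMMAS AND PROOFS =====

theorem pvAtA_eq (test : List Int) (i : Nat) : pvAtA test i = pvAt test i := rfl

theorem pvAppendLast_append (t : List (List Int)) (l : List Int) (x : Int) :
    pvAppendLast (t ++ [l]) x = t ++ [l ++ [x]] := by
  induction t with
  | nil => rfl
  | cons h t ih =>
    cases t with
    | nil => simp [pvAppendLast]
    | cons h' t' => simp [pvAppendLast] at ih ⊢; exact ih

-- A's branch condition is 'x = tv' for tv = if is1 then 1 else 0
theorem cond_eq_tv (x : Int) (is1 : Bool) :
    ((x == 1 && is1) || (x == 0 && !is1)) = true ↔ x = (if is1 then (1:Int) else 0) := by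
  cases is1 <;> simp

theorem runEnd_stop (test : List Int) (v : Int) (i : Nat)
    (h : ¬ (i < test.length ∧ pvAt test i = v)) : runEnd test v i = i := by
  rw [runEnd, dif_neg h]

theorem runEnd_step (test : List Int) (v : Int) (i : Nat)
    (h : i < test.length) (hv : pvAt test i = v) :
    runEnd test v i = runEnd test v (i+1) := by
  rw [runEnd, dif_pos ⟨h, hv⟩]

-- skipping a non-target element does not change the runs
theorem runsB_skip (test : List Int) (tv : Int) (i : Nat)
    (h : i < test.length) (hv : ¬ pvAt test i = tv) :
    runsB test tv i = runsB test tv (i+1) := by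
  rw [runsB, dif_pos h]
  simp only [if_neg hv, List.nil_append]
  by_cases hc : i + 1 < test.length ∧ pvAt test (i+1) = pvAt test i
  · -- same value continues the run: run ends agree
    rw [runEnd_step test _ i h rfl]
    conv_rhs => rw [runsB, dif_pos hc.1]
    rw [hc.2]
    simp [hv]
  · -- run of test[i] ends at i+1
    rw [runEnd_step test _ i h rfl, runEnd_stop test _ (i+1) hc]

-- the joint invariant: A's state machine equals B's run scan
theorem loop_eq_runs (test : List Int) (is1 : Bool) :
    ∀ k i target, test.length - i ≤ k → i ≤ test.length →
      (findLoop test is1 i target true =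
        target ++ runsB test (if is1 then (1:Int) else 0) i) ∧
      (findLoop test is1 i target false =
        pvAppendLast target ((runEnd test (if is1 then (1:Int) else 0) i : Int) - 1) ++
          runsB test (if is1 then (1:Int) else 0) (runEnd test (if is1 then (1:Int) else 0) i)) := by
  intro k
  set tv : Int := if is1 then (1:Int) else 0 with htv
  induction k with
  | zero =>
    intro i target hk hi
    have hie : i = test.length := by omega
    constructor
    · rw [findLoop, dif_neg (by omega), if_neg (by simp), runsB, dif_neg (by omega)]
      simp
    · rw [findLoop, dif_neg (by omega), if_pos rfl,
        runEnd_stop test tv i (by intro hc; omega), runsB, dif_neg (by omega)]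
      simp [hie]
  | succ k ih =>
    intro i target hk hi
    by_cases h : i < test.length
    · by_cases hv : pvAt test i = tv
      · -- target element
        have hc : ((pvAtA test i == 1 && is1) || (pvAtA test i == 0 && !is1)) = true := by
          rw [pvAtA_eq, cond_eq_tv, ← htv]; exact hv
        have hE : runEnd test tv i = runEnd test tv (i+1) := runEnd_step test tv i h hv
        constructor
        · rw [findLoop, dif_pos h, if_pos hc, if_neg (by simp)]
          rw [(ih (i+1) (target ++ [[(i:Int)]]) (by omega) (by omega)).2]
          rw [pvAppendLast_append]
          conv_rhs => rw [runsB, dif_pos h]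
          simp [hv, ← hE]
        · rw [findLoop, dif_pos h, if_pos hc, if_pos rfl]
          rw [(ih (i+1) target (by omega) (by omega)).2, hE]
      · -- non-target element
        have hc : ¬ ((pvAtA test i == 1 && is1) || (pvAtA test i == 0 && !is1)) = true := by
          rw [pvAtA_eq, cond_eq_tv, ← htv]; exact hv
        have hE : runEnd test tv i = i := runEnd_stop test tv i (by intro hc2; exact hv hc2.2)
        constructor
        · rw [findLoop, dif_pos h, if_neg hc, if_pos rfl]
          rw [(ih (i+1) target (by omega) (by omega)).1, ← runsB_skip test tv i h hv]
        · rw [findLoop, dif_pos h, if_neg hc, if_neg (by simp)]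
          rw [(ih (i+1) (pvAppendLast target ((i:Int) - 1)) (by omega) (by omega)).1]
          rw [hE, ← runsB_skip test tv i h hv]
    · have hie : i = test.length := by omega
      constructor
      · rw [findLoop, dif_neg (by omega), if_neg (by simp), runsB, dif_neg (by omega)]
        simp
      · rw [findLoop, dif_neg (by omega), if_pos rfl,
          runEnd_stop test tv i (by intro hc; omega), runsB, dif_neg (by omega)]
        simp [hie]

-- ===== VERDICT (by name: the statement is the Claim_ definition above) =====
theorem find_spec : Claim_equal_find := by
  intro test _hdom _hpre
  unfold Spec_find find find_alt
  cases h0 : PySem.List.pyGet? test 0 with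
  | none => rfl
  | some a =>
    cases h1 : PySem.List.pyGet? test (-1) with
    | none => rfl
    | some b =>
      show findLoop test (a == b && b == 0) 0 [] true =
        runsB test (if a == b && b == 0 then 1 else 0) 0
      rw [(loop_eq_runs test (a == b && b == 0) test.length 0 [] (by omega) (by omega)).1,
        List.nil_append]
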